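-- pv_equiv track=rewrite | github.com/enjoythecode/dsal | summer2023/binarysearch.py | binarysearch_leq
-- ===== SOURCE A (Python) =====
-- def binarysearch_leq(arr, target):
--     '''
--     Modified binary search that returns the index of the greatest element in arr
--     that is less than or equal to target. Returns -1 if no such elements
--
--     arr is assumed to be sorted.
--     '''
--     lo, hi = 0, len(arr) - 1
--
--     largest_valid_index = -1
--     while lo <= hi:
--         mi = lo + (hi - lo) // 2
--         if arr[mi] <= target:
--             largest_valid_index = mi
--             # keep searching to the right regardless...
--             lo = mi + 1
--         else:
--             hi = mi - 1
--
--     return largest_valid_index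
-- ===== SOURCE B (Python) =====
-- def binarysearch_leq(arr, target):
--     # Work on shrinking list slices instead of index bounds: probe the middle of
--     # the current segment, keep the right half (remembering the probe's global
--     # position via an offset) when the probe is <= target, else keep the left half.
--     seg, off, res = arr, 0, -1
--     while seg:
--         m = (len(seg) - 1) // 2
--         if seg[m] <= target:
--             res = off + m
--             off += m + 1
--             seg = seg[m + 1:]
--         else:
--             seg = seg[:m]
--     return res
-- ===== Notes on version B (the rewrite author's own statement) =====
-- stated objective: alternative
-- what changed: Replaced index-bound binary search (lo/hi pointers with a largest_valid_index accumulator over the fixed array) by a slice-shrinking loop that cuts the current list segment in half each step and tracks only a global offset; it probes the same elements in the same order, so it matches A on every input.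
import Mathlib
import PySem

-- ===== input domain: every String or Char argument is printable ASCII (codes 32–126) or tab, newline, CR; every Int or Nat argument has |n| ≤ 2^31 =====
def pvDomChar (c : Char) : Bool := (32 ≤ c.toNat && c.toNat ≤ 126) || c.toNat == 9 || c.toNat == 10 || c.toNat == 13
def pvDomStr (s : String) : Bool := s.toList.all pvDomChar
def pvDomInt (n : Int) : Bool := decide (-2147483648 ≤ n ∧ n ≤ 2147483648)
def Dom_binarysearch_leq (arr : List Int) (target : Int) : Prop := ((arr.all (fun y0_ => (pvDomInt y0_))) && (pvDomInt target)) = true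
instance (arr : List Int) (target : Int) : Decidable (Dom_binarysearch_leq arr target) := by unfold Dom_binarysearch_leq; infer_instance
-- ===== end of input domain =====

-- B replaces A's lo/hi index-bound binary search by a slice-shrinking loop over the
-- list itself (segment + global offset); same probes in the same order (objective: alternative).

-- ===== PORT A =====
-- the while loop of A, with a Nat fuel as totality guard (arr.length + 1 iterations
-- always suffice: the range shrinks each step); arr[mi] is always in range on
-- reachable states, so pyGetD's default 0 is never used
def pvLoopA (arr : List Int) (target : Int) : Nat → Int → Int → Int → Int
  | 0, _, _, acc => acc
  | fuel + 1, lo, hi, acc =>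
    if lo ≤ hi then
      let mi := lo + PySem.Int.floordiv (hi - lo) 2
      if PySem.List.pyGetD arr mi 0 ≤ target then
        pvLoopA arr target fuel (mi + 1) hi mi
      else
        pvLoopA arr target fuel lo (mi - 1) acc
    else acc

def binarysearch_leq (arr : List Int) (target : Int) : Int :=
  pvLoopA arr target (arr.length + 1) 0 ((arr.length : Int) - 1) (-1)

-- ===== PORT B =====
-- the while loop of Source B, recursing on the shrinking segment (its length is the
-- termination measure); m = (len(seg)-1)//2 is a Nat always in range, so seg[m] is
-- ported as seg.getD m 0 (the default is never used); the slices seg[m+1:] / seg[:m]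
-- with nonnegative in-range bounds are exactly List.drop / List.take
def pvScanB (target : Int) (seg : List Int) (off res : Int) : Int :=
  if hne : seg = [] then res
  else
    let m := (seg.length - 1) / 2
    if seg.getD m 0 ≤ target then
      pvScanB target (seg.drop (m + 1)) (off + (m : Int) + 1) (off + (m : Int))
    else
      pvScanB target (seg.take m) off res
termination_by seg.length
decreasing_by
  · have := List.length_pos_of_ne_nil hne; simp; omega
  · have := List.length_pos_of_ne_nil hne; simp; omega

def binarysearch_leq_alt (arr : List Int) (target : Int) : Int :=
  pvScanB target arr 0 (-1)

-- ===== PRECONDITION & SPEC =====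
def Spec_binarysearch_leq (arr : List Int) (target : Int) (out : Int) : Prop := out = binarysearch_leq_alt arr target
instance (arr : List Int) (target : Int) (out : Int) : Decidable (Spec_binarysearch_leq arr target out) := by unfold Spec_binarysearch_leq; infer_instance

-- ===== CLAIM (what is proved, stated in full; the proofs are below) =====
def Claim_equal_binarysearch_leq : Prop := ∀ (arr : List Int) (target : Int), Dom_binarysearch_leq arr target → Spec_binarysearch_leq arr target (binarysearch_leq arr target)

-- ===== LEMMAS AND PROOFS =====

-- correspondence: A's loop state (lo, hi, acc) matches B's state
-- (seg = arr[lo..hi], off = lo, res = acc)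
theorem pvLoopA_eq_scan (arr : List Int) (target : Int) :
    ∀ (fuel : Nat) (lo hi acc : Int), 0 ≤ lo → hi ≤ (arr.length : Int) - 1 →
      (hi + 1 - lo).toNat ≤ fuel →
      pvLoopA arr target fuel lo hi acc =
        pvScanB target ((arr.drop lo.toNat).take (hi + 1 - lo).toNat) lo acc := by
  intro fuel
  induction fuel with
  | zero =>
    intro lo hi acc hlo hhi hf
    have : (hi + 1 - lo).toNat = 0 := by omega
    rw [pvScanB]
    simp [pvLoopA, this]
  | succ n ih =>
    intro lo hi acc hlo hhi hf
    by_cases h : lo ≤ hi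
    · set L := lo.toNat with hL
      set N := (hi + 1 - lo).toNat with hN
      have hN1 : 1 ≤ N := by omega
      have hlen : ((arr.drop L).take N).length = N := by
        simp; omega
      have hne : (arr.drop L).take N ≠ [] := by
        intro hnil; rw [hnil] at hlen; simp at hlen; omega
      set m := (N - 1) / 2 with hm
      have hmN : m < N := by omega
      have hfd : PySem.Int.floordiv (hi - lo) 2 = (hi - lo) / 2 :=
        PySem.Int.floordiv_eq_ediv_of_pos (by omega)
      have hmi : lo + PySem.Int.floordiv (hi - lo) 2 = lo + (m : Int) := by
        rw [hfd]; omega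
      have hget : PySem.List.pyGetD arr (lo + PySem.Int.floordiv (hi - lo) 2) 0
          = ((arr.drop L).take N).getD m 0 := by
        rw [hmi]
        have h1 : lo + (m : Int) = ((L + m : Nat) : Int) := by omega
        rw [h1, PySem.List.pyGetD_natCast]
        rw [List.getD_eq_getElem?_getD, List.getD_eq_getElem?_getD]
        rw [List.getElem?_take_of_lt hmN, List.getElem?_drop]
      rw [pvLoopA, if_pos h, pvScanB, dif_neg hne]
      simp only [hlen, ← hm, hget]
      by_cases hc : ((arr.drop L).take N).getD m 0 ≤ target
      · rw [if_pos hc, if_pos hc, hmi]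
        have e1 : (lo + (m : Int) + 1).toNat = L + (m + 1) := by omega
        have e2 : (hi + 1 - (lo + (m : Int) + 1)).toNat = N - (m + 1) := by omega
        have hdrop : (arr.drop (lo + (m : Int) + 1).toNat).take (hi + 1 - (lo + (m : Int) + 1)).toNat
            = ((arr.drop L).take N).drop (m + 1) := by
          rw [e1, e2, List.drop_take, List.drop_drop]
        rw [ih (lo + (m : Int) + 1) hi (lo + (m : Int)) (by omega) hhi (by omega), hdrop]
      · rw [if_neg hc, if_neg hc, hmi]
        have e3 : (lo + (m : Int) - 1 + 1 - lo).toNat = m := by omega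
        have htake : (arr.drop lo.toNat).take (lo + (m : Int) - 1 + 1 - lo).toNat
            = ((arr.drop L).take N).take m := by
          rw [← hL, e3, List.take_take, Nat.min_eq_left (by omega)]
        rw [ih lo (lo + (m : Int) - 1) acc hlo (by omega) (by omega), htake]
    · have : (hi + 1 - lo).toNat = 0 := by omega
      rw [pvScanB]
      simp [pvLoopA, h, this]

-- ===== VERDICT (by name: the statement is the Claim_ definition above) =====
theorem binarysearch_leq_spec : Claim_equal_binarysearch_leq := by
  intro arr target _
  unfold Spec_binarysearch_leq binarysearch_leq binarysearch_leq_alt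
  rw [pvLoopA_eq_scan arr target (arr.length + 1) 0 ((arr.length : Int) - 1) (-1)
      (by omega) (by omega) (by omega)]
  simp
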